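-- pv_equiv track=rewrite | github.com/teinhonglo/Information-retrieval | Vector-Space-Model/v1.0-deprecated/ProcDoc.py | doc_preprocess
-- ===== SOURCE A (Python) =====
-- import collections
--
-- def doc_preprocess(dictionary):
-- 	dictionary = collections.OrderedDict(sorted(dictionary.items()))
-- 	for key, value in dictionary.items():
-- 		content = ""
-- 		temp_content = ""
-- 		count = 0
-- 		# split content by special character
-- 		for line in dictionary[key].split('\n'):
-- 			if count < 3:
-- 				count += 1
-- 				continue
-- 			else:
-- 				for word in line.split('-1'):
-- 					temp_content += word + " "
-- 		# delete double white space
-- 		for word in temp_content.split():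
-- 			content += word + " "
-- 		# replace old content
-- 		dictionary[key]	= content
-- 	# term probability(word_count / word sum)
-- 	for doc_key, doc_content in dictionary.items():
-- 		doc_words = word_count(doc_content, {})
-- 		dictionary[doc_key] = doc_words
--
-- 	return dictionary
--
-- def word_count(content, bg_word):
-- 	for part in content.split():
-- 		if part in bg_word:
-- 			bg_word[part] += 1
-- 		else:
-- 			bg_word[part] = 1
-- 	# return word count dictionary
-- 	return bg_word
-- ===== SOURCE B (Python) =====
-- import collections
--
-- def doc_preprocess(dictionary):
--     result = collections.OrderedDict()
--     for key, value in sorted(dictionary.items()):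
--         counts = {}
--         for line in value.split('\n')[3:]:
--             for piece in line.split('-1'):
--                 for word in piece.split():
--                     counts[word] = counts.get(word, 0) + 1
--         result[key] = counts
--     return result
-- ===== Notes on version B (the rewrite author's own statement) =====
-- stated objective: simpler
-- what changed: Replaces A's three string-rebuilding passes per document (concatenate pieces with spaces, re-split, concatenate words, re-split, then count) by one fused pass that slices off the first three lines and increments a fresh count dict directly, building a new OrderedDict instead of mutating the argument.
import Mathlib
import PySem

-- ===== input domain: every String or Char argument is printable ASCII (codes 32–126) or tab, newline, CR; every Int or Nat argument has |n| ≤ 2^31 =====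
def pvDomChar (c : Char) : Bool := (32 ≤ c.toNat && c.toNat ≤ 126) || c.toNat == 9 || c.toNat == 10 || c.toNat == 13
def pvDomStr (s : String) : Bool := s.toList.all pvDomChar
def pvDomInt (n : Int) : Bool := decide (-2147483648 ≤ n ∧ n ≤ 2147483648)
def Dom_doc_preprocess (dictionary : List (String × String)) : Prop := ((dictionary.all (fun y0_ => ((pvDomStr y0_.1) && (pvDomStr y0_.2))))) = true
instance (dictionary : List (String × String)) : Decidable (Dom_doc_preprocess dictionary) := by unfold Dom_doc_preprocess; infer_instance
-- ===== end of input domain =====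

-- B replaces A's three string-rebuilding passes per document by one fused counting pass
-- over lines[3:] into a fresh dict (objective: simpler).  Note: the Python A mutates its
-- argument dict in place; B builds a fresh OrderedDict — the equivalence proved here is
-- about the RETURN value only.

-- ===== PORT A =====
-- word_count(content, bg_word): counts whitespace-split words of content into bg_word
def pvWordCount (content : List Char) (bg : PySem.Dict (List Char) Int) :
    PySem.Dict (List Char) Int :=
  (PySem.Chars.split₀ content).foldl
    (fun d part =>
      if d.contains part then d.insert part (d.getD part 0 + 1) else d.insert part 1) bg

-- the first inner loop of A: skip three lines (count), append each '-1'-piece plus " "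
def pvTempFoldA (lines : List (List Char)) : List Char × Nat :=
  lines.foldl
    (fun (st : List Char × Nat) line =>
      if st.2 < 3 then (st.1, st.2 + 1)
      else ((PySem.Chars.splitOn line ['-', '1']).foldl (fun t w => t ++ w ++ [' ']) st.1,
            st.2))
    ([], 0)

-- A reads and rewrites the values of a sorted dict; under Pre_ (unique keys) the
-- OrderedDict built from sorted items and its in-place value updates are exactly a map
-- over the sorted association list.
def doc_preprocess (dictionary : List (String × String)) :
    List (String × List (String × Int)) :=
  let d := PySem.List.sorted2 dictionary (·.1) (·.2)
  let d2 := d.map (fun kv =>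
    let temp := (pvTempFoldA (PySem.Chars.splitOn kv.2.toList ['\n'])).1
    let content := (PySem.Chars.split₀ temp).foldl (fun c w => c ++ w ++ [' ']) []
    (kv.1, content))
  d2.map (fun kv =>
    (kv.1, (pvWordCount kv.2 PySem.Dict.empty).items.map (fun p => (String.ofList p.1, p.2))))

-- ===== PORT B =====
-- B's fused per-document pass: for line in value.split('\n')[3:], for piece in
-- line.split('-1'), for word in piece.split(): counts[word] = counts.get(word, 0) + 1
def pvCountsB (value : List Char) : PySem.Dict (List Char) Int :=
  ((PySem.Chars.splitOn value ['\n']).drop 3).foldl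
    (fun c line =>
      (PySem.Chars.splitOn line ['-', '1']).foldl
        (fun c piece =>
          (PySem.Chars.split₀ piece).foldl
            (fun (c : PySem.Dict (List Char) Int) w => c.insert w (c.getD w 0 + 1)) c)
        c)
    PySem.Dict.empty

def doc_preprocess_alt (dictionary : List (String × String)) :
    List (String × List (String × Int)) :=
  ((PySem.List.sorted2 dictionary (·.1) (·.2)).foldl
    (fun (res : PySem.Dict String (List (String × Int))) kv =>
      res.insert kv.1 ((pvCountsB kv.2.toList).items.map (fun p => (String.ofList p.1, p.2))))
    PySem.Dict.empty).items

-- ===== PRECONDITION & SPEC =====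
-- Pre_ excludes association lists with duplicate keys: the Python argument is a dict,
-- which cannot contain them, so the assoc-list encoding is ambiguous there.
def Pre_doc_preprocess (dictionary : List (String × String)) : Prop :=
  (dictionary.map Prod.fst).Nodup
instance (dictionary : List (String × String)) : Decidable (Pre_doc_preprocess dictionary) := by
  unfold Pre_doc_preprocess; infer_instance
def pvWitness_doc_preprocess : (List (String × String)) :=
  [("d1", "h1\nh2\nh3\na b-1c\nb"), ("d2", "x")]
def Spec_doc_preprocess (dictionary : List (String × String))
    (out : List (String × List (String × Int))) : Prop :=
  out = doc_preprocess_alt dictionary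
instance (dictionary : List (String × String)) (out : List (String × List (String × Int))) :
    Decidable (Spec_doc_preprocess dictionary out) := by
  unfold Spec_doc_preprocess; infer_instance

-- ===== CLAIM (what is proved, stated in full; the proofs are below) =====
def Claim_equal_doc_preprocess : Prop :=
  ∀ (dictionary : List (String × String)), Dom_doc_preprocess dictionary →
    Pre_doc_preprocess dictionary →
    Spec_doc_preprocess dictionary (doc_preprocess dictionary)

-- ===== LEMMAS AND PROOFS =====

-- the '-1'-pieces of one line
def pvPieces (l : List Char) : List (List Char) := PySem.Chars.splitOn l ['-', '1']

-- the word list both sides count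
def pvWords (v : List Char) : List (List Char) :=
  ((PySem.Chars.splitOn v ['\n']).drop 3).flatMap (fun l => (pvPieces l).flatMap PySem.Chars.split₀)

-- go is accumulator-passing: the accumulator splits off
theorem pvGo_acc (s : List Char) : ∀ cur acc,
    PySem.Chars.split₀.go s cur acc = acc.reverse ++ PySem.Chars.split₀.go s cur [] := by
  induction s with
  | nil => intro cur acc; simp [PySem.Chars.split₀.go]; split <;> simp
  | cons c rest ih =>
    intro cur acc
    simp only [PySem.Chars.split₀.go]
    split
    · split
      · exact ih [] acc
      · rw [ih [] (cur.reverse :: acc), ih [] [cur.reverse]]; simp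
    · exact ih (c :: cur) acc

-- splitting at an explicit space concatenates the splits
theorem pvGo_space (rest : List Char) : ∀ (w cur : List Char) (acc : List (List Char)),
    PySem.Chars.split₀.go (w ++ ' ' :: rest) cur acc
      = PySem.Chars.split₀.go w cur acc ++ PySem.Chars.split₀.go rest [] [] := by
  intro w
  induction w with
  | nil =>
    intro cur acc
    simp only [List.nil_append, PySem.Chars.split₀.go]
    have hsp : PySem.Chars.isspace ' ' = true := by decide
    rw [hsp]
    simp only [if_true]
    split
    · rw [pvGo_acc rest [] acc]
    · rw [pvGo_acc rest [] (cur.reverse :: acc)]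
  | cons c w ih =>
    intro cur acc
    simp only [List.cons_append, PySem.Chars.split₀.go]
    split
    · split
      · exact ih [] acc
      · exact ih [] (cur.reverse :: acc)
    · exact ih (c :: cur) acc

theorem pvSplit₀_space_append (w rest : List Char) :
    PySem.Chars.split₀ (w ++ ' ' :: rest) = PySem.Chars.split₀ w ++ PySem.Chars.split₀ rest := by
  simp only [PySem.Chars.split₀]
  exact pvGo_space rest w [] []

-- a nonempty all-nonspace string splits to itself
theorem pvGo_nonspace : ∀ (w cur : List Char) (acc : List (List Char)),
    w.all (fun c => !PySem.Chars.isspace c) = true →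
    PySem.Chars.split₀.go w cur acc
      = if (cur.reverse ++ w).isEmpty then acc.reverse else acc.reverse ++ [cur.reverse ++ w] := by
  intro w
  induction w with
  | nil =>
    intro cur acc _
    simp only [PySem.Chars.split₀.go, List.append_nil]
    rcases cur with _ | ⟨c, cs⟩ <;> simp
  | cons c w ih =>
    intro cur acc hall
    simp only [List.all_cons, Bool.and_eq_true] at hall
    simp only [PySem.Chars.split₀.go]
    have h1 : PySem.Chars.isspace c = false := by simpa using hall.1
    rw [h1, if_neg (by simp : ¬ (false = true)), ih (c :: cur) acc hall.2]
    simp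

theorem pvSplit₀_single (w : List Char) (hne : w ≠ []) (hns : w.all (fun c => !PySem.Chars.isspace c)) :
    PySem.Chars.split₀ w = [w] := by
  rw [PySem.Chars.split₀, pvGo_nonspace w [] [] hns]
  simp [hne]

-- every word produced by split₀ is nonempty and space-free
theorem pvGo_words : ∀ (s cur : List Char) (acc : List (List Char)),
    cur.all (fun c => !PySem.Chars.isspace c) = true →
    (∀ w ∈ acc, w ≠ [] ∧ w.all (fun c => !PySem.Chars.isspace c)) →
    ∀ w ∈ PySem.Chars.split₀.go s cur acc, w ≠ [] ∧ w.all (fun c => !PySem.Chars.isspace c) := by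
  intro s
  induction s with
  | nil =>
    intro cur acc hcur hacc w hw
    simp only [PySem.Chars.split₀.go] at hw
    split at hw
    · exact hacc w (List.mem_reverse.mp hw)
    · rw [List.mem_reverse, List.mem_cons] at hw
      rcases hw with hw | hw
      · subst hw
        refine ⟨by simpa using (by simpa using ‹¬ cur.isEmpty = true›), by simpa using hcur⟩
      · exact hacc w hw
  | cons c rest ih =>
    intro cur acc hcur hacc w hw
    simp only [PySem.Chars.split₀.go] at hw
    split at hw
    · split at hw
      · exact ih [] acc (by simp) hacc w hw
      · refine ih [] (cur.reverse :: acc) (by simp) ?_ w hw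
        intro u hu
        rcases List.mem_cons.mp hu with hu | hu
        · subst hu
          exact ⟨by simpa using (by simpa using ‹¬ cur.isEmpty = true›), by simpa using hcur⟩
        · exact hacc u hu
    · refine ih (c :: cur) acc ?_ hacc w hw
      simp only [List.all_cons, Bool.and_eq_true]
      exact ⟨by simpa using ‹¬ PySem.Chars.isspace c = true›, hcur⟩

theorem pvSplit₀_words (s : List Char) :
    ∀ w ∈ PySem.Chars.split₀ s, w ≠ [] ∧ w.all (fun c => !PySem.Chars.isspace c) :=
  pvGo_words s [] [] (by simp) (by simp)

-- splitting a space-terminated concatenation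
theorem pvSplit₀_flat (P : List (List Char)) :
    PySem.Chars.split₀ (P.flatMap (fun w => w ++ [' '])) = P.flatMap PySem.Chars.split₀ := by
  induction P with
  | nil => simp [PySem.Chars.split₀, PySem.Chars.split₀.go]
  | cons w P ih => simpa [pvSplit₀_space_append] using congrArg (PySem.Chars.split₀ w ++ ·) ih

theorem pvFoldAppend (ws : List (List Char)) : ∀ t : List Char,
    ws.foldl (fun c w => c ++ w ++ [' ']) t = t ++ ws.flatMap (fun w => w ++ [' ']) := by
  induction ws with
  | nil => simp
  | cons w ws ih => intro t; rw [List.foldl_cons, ih]; simp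

theorem pvTempFold_gen : ∀ (lines : List (List Char)) (t : List Char) (c : Nat),
    (lines.foldl
      (fun (st : List Char × Nat) line =>
        if st.2 < 3 then (st.1, st.2 + 1)
        else ((PySem.Chars.splitOn line ['-', '1']).foldl (fun t w => t ++ w ++ [' ']) st.1,
              st.2)) (t, c)).1
      = t ++ (lines.drop (3 - c)).flatMap (fun l => (pvPieces l).flatMap (fun w => w ++ [' '])) := by
  intro lines
  induction lines with
  | nil => intro t c; simp
  | cons l rest ih =>
    intro t c
    by_cases hc : c < 3
    · obtain ⟨m, hm1, hm2⟩ : ∃ m, 3 - c = m + 1 ∧ 3 - (c + 1) = m :=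
        ⟨3 - (c + 1), by omega, rfl⟩
      rw [List.foldl_cons, if_pos hc, ih t (c + 1), hm1, hm2, List.drop_succ_cons]
    · have h0 : 3 - c = 0 := by omega
      rw [List.foldl_cons, if_neg hc, ih _ c, h0, List.drop_zero, List.drop_zero]
      have := pvFoldAppend (PySem.Chars.splitOn l ['-', '1']) t
      simp only [] at this ⊢
      rw [this]
      simp [pvPieces, List.flatMap_cons, List.append_assoc]

theorem pvTempFoldA_spec (lines : List (List Char)) :
    (pvTempFoldA lines).1
      = (lines.drop 3).flatMap (fun l => (pvPieces l).flatMap (fun w => w ++ [' '])) := by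
  rw [pvTempFoldA, pvTempFold_gen lines [] 0]
  simp

theorem pvWordCount_eq_counter (content : List Char) :
    pvWordCount content PySem.Dict.empty = PySem.Dict.counter (PySem.Chars.split₀ content) := by
  have hstep :
      (fun (d : PySem.Dict (List Char) Int) part =>
        if d.contains part then d.insert part (d.getD part 0 + 1) else d.insert part 1)
      = fun d part => d.insert part (d.getD part 0 + 1) := by
    funext d part
    by_cases h : d.contains part = true
    · simp [h]
    · simp only [Bool.not_eq_true] at h
      simp [h, PySem.Dict.getD_of_not_contains d 0 h]
  rw [pvWordCount, hstep, PySem.Dict.foldl_insert_getD_add_one_eq_counter]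

theorem pvCountsB_eq_counter (v : List Char) :
    pvCountsB v = PySem.Dict.counter (pvWords v) := by
  rw [pvCountsB, pvWords, ← PySem.Dict.foldl_insert_getD_add_one_eq_counter,
      List.foldl_flatMap]
  simp only [pvPieces, List.foldl_flatMap]

theorem pvFlatMap_id (W : List (List Char)) (h : ∀ w ∈ W, PySem.Chars.split₀ w = [w]) :
    W.flatMap PySem.Chars.split₀ = W := by
  induction W with
  | nil => simp
  | cons w W ih =>
    rw [List.flatMap_cons, h w (by simp), ih (fun u hu => h u (by simp [hu]))]
    rfl

-- A's per-document value equals B's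
theorem pvPerDoc (v : List Char) :
    pvWordCount
      ((PySem.Chars.split₀ (pvTempFoldA (PySem.Chars.splitOn v ['\n'])).1).foldl
        (fun c w => c ++ w ++ [' ']) [])
      PySem.Dict.empty = pvCountsB v := by
  rw [pvWordCount_eq_counter, pvCountsB_eq_counter]
  congr 1
  rw [pvFoldAppend, List.nil_append, pvTempFoldA_spec]
  rw [show ((PySem.Chars.splitOn v ['\n']).drop 3).flatMap
        (fun l => (pvPieces l).flatMap (fun w => w ++ [' ']))
      = (((PySem.Chars.splitOn v ['\n']).drop 3).flatMap pvPieces).flatMap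
        (fun w => w ++ [' ']) from (List.flatMap_assoc ..).symm]
  rw [pvSplit₀_flat, pvSplit₀_flat]
  have hw : ∀ w ∈ (((PySem.Chars.splitOn v ['\n']).drop 3).flatMap pvPieces).flatMap
      PySem.Chars.split₀, PySem.Chars.split₀ w = [w] := by
    intro w hmem
    simp only [List.mem_flatMap] at hmem
    obtain ⟨p, _, hp⟩ := hmem
    obtain ⟨h1, h2⟩ := pvSplit₀_words p w hp
    exact pvSplit₀_single w h1 h2
  rw [pvFlatMap_id _ hw, pvWords]
  exact List.flatMap_assoc ..

-- ===== VERDICT (by name: the statement is the Claim_ definition above) =====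
theorem doc_preprocess_spec : Claim_equal_doc_preprocess := by
  intro dictionary _ hpre
  unfold Spec_doc_preprocess doc_preprocess doc_preprocess_alt
  have hperm := PySem.List.sorted2_perm dictionary (fun x => x.1) (fun x => x.2) false
  have hnod : ((PySem.List.sorted2 dictionary (fun x => x.1) (fun x => x.2)).map
      (fun kv : String × String => kv.1)).Nodup :=
    ((hperm.map (fun kv : String × String => kv.1)).nodup_iff).mpr hpre
  rw [PySem.Dict.items_foldl_insert_fresh _ (fun kv : String × String => kv.1) _
        PySem.Dict.empty (fun a _ => rfl) hnod]
  show _ = ([] : List (String × List (String × Int))) ++ _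
  rw [List.nil_append, List.map_map]
  apply List.map_congr_left
  intro kv _
  show (kv.1, _) = (kv.1, _)
  rw [pvPerDoc kv.2.toList]
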